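-- pv_equiv track=rewrite | github.com/epilectrik/voynich | phases/MACRO_AUTOMATON_NECESSITY/scripts/automaton_necessity.py | get_fine_role
-- ===== SOURCE A (Python) =====
-- ROLE_FAMILIES = {
--     'CC': {10, 11, 12},
--     'FQ': {9, 13, 14, 23},
--     'FL_HAZ': {7, 30},
--     'FL_SAFE': {38, 40},
-- }
--
-- def get_fine_role(cls_id):
--     """Get fine-grained role (FL_HAZ, FL_SAFE, CC, FQ, EN, AX)."""
--     for role, classes in ROLE_FAMILIES.items():
--         if cls_id in classes:
--             return role
--     # Not in special roles: EN or AX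
--     # EN: class 8, and classes 31-49 minus FL
--     en_set = ({8} | set(range(31, 50))) - ROLE_FAMILIES['FL_HAZ'] - ROLE_FAMILIES['FL_SAFE']
--     if cls_id in en_set:
--         return 'EN'
--     return 'AX'
-- ===== SOURCE B (Python) =====
-- CLASS_TO_ROLE = {10: 'CC', 11: 'CC', 12: 'CC',
--                  9: 'FQ', 13: 'FQ', 14: 'FQ', 23: 'FQ',
--                  7: 'FL_HAZ', 30: 'FL_HAZ',
--                  38: 'FL_SAFE', 40: 'FL_SAFE'}
-- for _c in sorted({8} | set(range(31, 50)) - {38, 40}):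
--     CLASS_TO_ROLE[_c] = 'EN'
--
-- def get_fine_role(cls_id):
--     """Get fine-grained role (FL_HAZ, FL_SAFE, CC, FQ, EN, AX)."""
--     return CLASS_TO_ROLE.get(cls_id, 'AX')
-- ===== Notes on version B (the rewrite author's own statement) =====
-- stated objective: idiomatic
-- what changed: Replaces the per-call loop over ROLE_FAMILIES plus per-call construction of en_set by one precomputed module-level dict CLASS_TO_ROLE, so the function body is a single dict .get with default 'AX'.
import Mathlib
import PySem

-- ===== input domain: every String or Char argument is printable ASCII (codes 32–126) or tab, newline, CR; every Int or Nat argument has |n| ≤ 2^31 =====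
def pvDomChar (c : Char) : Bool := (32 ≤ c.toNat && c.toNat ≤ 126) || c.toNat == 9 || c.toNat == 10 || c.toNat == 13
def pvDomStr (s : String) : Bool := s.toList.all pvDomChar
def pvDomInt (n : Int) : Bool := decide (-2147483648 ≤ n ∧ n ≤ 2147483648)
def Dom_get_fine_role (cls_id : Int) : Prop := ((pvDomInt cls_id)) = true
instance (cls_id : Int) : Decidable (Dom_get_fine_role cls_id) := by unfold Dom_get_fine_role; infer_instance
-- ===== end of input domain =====

-- B replaces A's per-call family loop and en-set construction by one precomputed
-- class-id → role table looked up with a default of "AX" (idiomatic/constant-time lookup).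


-- ===== PORT A =====
def ROLE_FAMILIES : PySem.Dict String (PySem.Set Int) :=
  PySem.Dict.ofList
    [("CC", PySem.Set.ofList [10, 11, 12]),
     ("FQ", PySem.Set.ofList [9, 13, 14, 23]),
     ("FL_HAZ", PySem.Set.ofList [7, 30]),
     ("FL_SAFE", PySem.Set.ofList [38, 40])]

-- the 'for role, classes in ROLE_FAMILIES.items()' loop with early return
def gfrLoop (cls_id : Int) : List (String × PySem.Set Int) → Option String
  | [] => none
  | (role, classes) :: rest =>
    if PySem.Set.contains classes cls_id then some role else gfrLoop cls_id rest

def get_fine_role (cls_id : Int) : String :=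
  match gfrLoop cls_id ROLE_FAMILIES.items with
  | some role => role
  | none =>
    let en_set : PySem.Set Int :=
      PySem.Set.diff
        (PySem.Set.diff
          (PySem.Set.union (PySem.Set.ofList [8]) (PySem.Set.ofList (PySem.List.pyRange 31 50 1)))
          (ROLE_FAMILIES.getD "FL_HAZ" []))
        (ROLE_FAMILIES.getD "FL_SAFE" [])
    if PySem.Set.contains en_set cls_id then "EN" else "AX"

-- ===== PORT B =====
def CLASS_TO_ROLE : PySem.Dict Int String :=
  let base : PySem.Dict Int String :=
    PySem.Dict.ofList
      [(10, "CC"), (11, "CC"), (12, "CC"),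
       (9, "FQ"), (13, "FQ"), (14, "FQ"), (23, "FQ"),
       (7, "FL_HAZ"), (30, "FL_HAZ"),
       (38, "FL_SAFE"), (40, "FL_SAFE")]
  (PySem.List.sorted
      (PySem.Set.union (PySem.Set.ofList [8])
        (PySem.Set.diff (PySem.Set.ofList (PySem.List.pyRange 31 50 1)) (PySem.Set.ofList [38, 40])))
      (fun x => x) false).foldl
    (fun d c => d.insert c "EN") base

def get_fine_role_alt (cls_id : Int) : String :=
  CLASS_TO_ROLE.getD cls_id "AX"

-- ===== PRECONDITION & SPEC =====
def Spec_get_fine_role (cls_id : Int) (out : String) : Prop := out = get_fine_role_alt cls_id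
instance (cls_id : Int) (out : String) : Decidable (Spec_get_fine_role cls_id out) := by unfold Spec_get_fine_role; infer_instance

-- ===== CLAIM (what is proved, stated in full; the proofs are below) =====
def Claim_equal_get_fine_role : Prop := ∀ (cls_id : Int), Dom_get_fine_role cls_id → Spec_get_fine_role cls_id (get_fine_role cls_id)

-- ===== LEMMAS AND PROOFS =====
-- Outside 7..49 both programs answer "AX": every literal key test fails.
theorem gfrA_outside (c : Int) (h : c < 7 ∨ 49 < c) : get_fine_role c = "AX" := by
  have hI : ROLE_FAMILIES.items =
      [("CC", [10, 11, 12]), ("FQ", [9, 13, 14, 23]),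
       ("FL_HAZ", [7, 30]), ("FL_SAFE", [38, 40])] := by decide
  have hE : PySem.Set.diff
      (PySem.Set.diff
        (PySem.Set.union (PySem.Set.ofList [8]) (PySem.Set.ofList (PySem.List.pyRange 31 50 1)))
        (ROLE_FAMILIES.getD "FL_HAZ" []))
      (ROLE_FAMILIES.getD "FL_SAFE" []) =
      ([8, 31, 32, 33, 34, 35, 36, 37, 39, 41, 42, 43, 44, 45, 46, 47, 48, 49] : List Int) := by
    decide
  simp only [get_fine_role, hI, hE, gfrLoop]
  norm_num [PySem.Set.contains]
  rw [if_neg (by omega), if_neg (by omega), if_neg (by omega), if_neg (by omega),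
    if_neg (by norm_num; omega)]

theorem gfrB_outside (c : Int) (h : c < 7 ∨ 49 < c) : get_fine_role_alt c = "AX" := by
  have hC : CLASS_TO_ROLE = PySem.Dict.mk
      [(10, "CC"), (11, "CC"), (12, "CC"),
       (9, "FQ"), (13, "FQ"), (14, "FQ"), (23, "FQ"),
       (7, "FL_HAZ"), (30, "FL_HAZ"),
       (38, "FL_SAFE"), (40, "FL_SAFE"),
       (8, "EN"), (31, "EN"), (32, "EN"), (33, "EN"), (34, "EN"), (35, "EN"), (36, "EN"),
       (37, "EN"), (39, "EN"), (41, "EN"), (42, "EN"), (43, "EN"), (44, "EN"), (45, "EN"),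
       (46, "EN"), (47, "EN"), (48, "EN"), (49, "EN")] := by decide
  simp only [get_fine_role_alt, hC]
  norm_num [PySem.Dict.getD, PySem.Dict.get?, List.find?]
  repeat' split
  all_goals simp_all
  all_goals omega

-- ===== VERDICT (by name: the statement is the Claim_ definition above) =====
theorem get_fine_role_spec : Claim_equal_get_fine_role := by
  intro c _
  unfold Spec_get_fine_role
  by_cases h : 7 ≤ c ∧ c ≤ 49
  · obtain ⟨h1, h2⟩ := h
    interval_cases c <;> decide
  · rw [gfrA_outside c (by omega), gfrB_outside c (by omega)]
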